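-- pv_equiv track=rewrite | github.com/ybezginova2016/Python_tasks | 14_IterationsGenerators/R-1.6.py | sum_of_squares_odd
-- ===== SOURCE A (Python) =====
-- def sum_of_squares_odd(n):
--     n -= 1
--     total = 0
--     while n > 0:
--         if n % 2 != 0:
--             total += n * n
--         n -= 1
--     return total
-- ===== SOURCE B (Python) =====
-- def sum_of_squares_odd(n):
--     m = n // 2 if n > 0 else 0  # number of odd integers below n
--     return m * (2 * m - 1) * (2 * m + 1) // 3
-- ===== Notes on version B (the rewrite author's own statement) =====
-- stated objective: faster
-- what changed: Replaced the descending while-loop accumulation with the closed form m(2m-1)(2m+1)//3 where m = n//2 is the count of odd numbers below n.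
import Mathlib
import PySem

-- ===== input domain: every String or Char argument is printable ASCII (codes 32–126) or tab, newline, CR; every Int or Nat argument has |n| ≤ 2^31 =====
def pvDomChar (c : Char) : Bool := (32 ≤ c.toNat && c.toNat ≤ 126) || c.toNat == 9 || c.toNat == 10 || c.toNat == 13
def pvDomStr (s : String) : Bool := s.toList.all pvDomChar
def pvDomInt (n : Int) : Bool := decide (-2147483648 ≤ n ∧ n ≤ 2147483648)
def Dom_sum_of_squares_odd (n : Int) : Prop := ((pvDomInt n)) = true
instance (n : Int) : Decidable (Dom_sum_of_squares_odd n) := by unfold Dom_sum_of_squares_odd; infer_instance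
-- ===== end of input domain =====

-- B replaces A's descending O(n) accumulation loop by the O(1) closed form
-- m(2m-1)(2m+1)//3 with m = n//2 the count of odd numbers below n.

-- ===== PORT A =====
-- the while-loop of A: condition n > 0, body adds n*n when n is odd, then n -= 1
def sumOddLoop (n total : Int) : Int :=
  if _h : n > 0 then
    sumOddLoop (n - 1) (if PySem.Int.mod n 2 ≠ 0 then total + n * n else total)
  else total
termination_by n.toNat
decreasing_by omega

def sum_of_squares_odd (n : Int) : Int := sumOddLoop (n - 1) 0

-- ===== PORT B =====
def sum_of_squares_odd_alt (n : Int) : Int :=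
  let m : Int := if n > 0 then PySem.Int.floordiv n 2 else 0
  PySem.Int.floordiv (m * (2 * m - 1) * (2 * m + 1)) 3

-- ===== PRECONDITION & SPEC =====
def Spec_sum_of_squares_odd (n : Int) (out : Int) : Prop := out = sum_of_squares_odd_alt n
instance (n : Int) (out : Int) : Decidable (Spec_sum_of_squares_odd n out) := by unfold Spec_sum_of_squares_odd; infer_instance

-- ===== CLAIM (what is proved, stated in full; the proofs are below) =====
def Claim_equal_sum_of_squares_odd : Prop := ∀ (n : Int), Dom_sum_of_squares_odd n → Spec_sum_of_squares_odd n (sum_of_squares_odd n)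

-- ===== LEMMAS AND PROOFS =====

-- running sum of the squares of the first k odd numbers
def oddSqSum : Nat → Int
  | 0 => 0
  | k + 1 => oddSqSum k + (2 * (k : Int) + 1) ^ 2

theorem oddSqSum_closed (k : Nat) :
    (k : Int) * (2 * k - 1) * (2 * k + 1) = 3 * oddSqSum k := by
  induction k with
  | zero => simp [oddSqSum]
  | succ k ih => push_cast [oddSqSum]; push_cast at ih; ring_nf; ring_nf at ih; omega

-- the loop computes total + oddSqSum (count of odds ≤ n) = total + oddSqSum ((n+1)/2)⁺
theorem sumOddLoop_eq (n total : Int) :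
    sumOddLoop n total = total + oddSqSum ((n + 1) / 2).toNat := by
  by_cases h : n > 0
  · rw [sumOddLoop]
    simp only [h, dif_pos]
    rw [sumOddLoop_eq (n - 1)]
    have hm : PySem.Int.mod n 2 = n % 2 := PySem.Int.mod_eq_emod_of_pos (by omega)
    rcases Int.emod_two_eq n with he | he
    · -- n even: count unchanged
      have hc : ((n - 1 + 1) / 2).toNat = ((n + 1) / 2).toNat := by omega
      rw [hc] at *
      simp [he]
    · -- n odd: count drops by one, square n*n = (2k+1)² with k = (n-1)/2 count
      have hk : ((n + 1) / 2).toNat = ((n - 1 + 1) / 2).toNat + 1 := by omega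
      have hn : (((n - 1 + 1) / 2).toNat : Int) * 2 + 1 = n := by omega
      rw [hk]
      simp only [hm, he, oddSqSum]
      have : (2 * (((n - 1 + 1) / 2).toNat : Int) + 1) ^ 2 = n * n := by
        rw [show (2 * (((n - 1 + 1) / 2).toNat : Int) + 1) = n by omega]; ring
      rw [this]
      norm_num
      ring
  · rw [sumOddLoop]
    simp only [dif_neg h]
    have : ((n + 1) / 2).toNat = 0 := by omega
    simp [this, oddSqSum]
termination_by n.toNat
decreasing_by omega

-- ===== VERDICT (by name: the statement is the Claim_ definition above) =====
theorem sum_of_squares_odd_spec : Claim_equal_sum_of_squares_odd := by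
  intro n _
  unfold Spec_sum_of_squares_odd sum_of_squares_odd sum_of_squares_odd_alt
  rw [sumOddLoop_eq]
  set k : Nat := ((n - 1 + 1) / 2).toNat with hk
  by_cases h : n > 0
  · have hfd : PySem.Int.floordiv n 2 = n / 2 := PySem.Int.floordiv_eq_ediv_of_pos (by omega)
    have hkn : (k : Int) = n / 2 := by omega
    simp only [h, if_pos, hfd, ← hkn]
    rw [show (k : Int) * (2 * k - 1) * (2 * k + 1) = 3 * oddSqSum k from oddSqSum_closed k] at *
    rw [PySem.Int.floordiv_eq_ediv_of_pos (by norm_num)]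
    omega
  · have hk0 : k = 0 := by omega
    simp [h, hk0, oddSqSum, PySem.Int.floordiv]
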